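-- pv_equiv track=rewrite | github.com/Xalibur1/research_rag | compare/comparison_engine.py | group_papers
-- ===== SOURCE A (Python) =====
-- def group_papers(
--     papers: list[dict],
--     group_by: list[str] | None = None,
-- ) -> dict[str, list[dict]]:
--     """Group papers by one or more fields.
--
--     The group key is a ``|``-separated string of field values.
--     """
--     if not group_by:
--         return {"all": papers}
--
--     groups: dict[str, list[dict]] = {}
--     for p in papers:
--         parts = []
--         for field in group_by:
--             val = p.get(field, "unknown")
--             if isinstance(val, list):
--                 val = ",".join(str(v) for v in val)
--             parts.append(str(val))
--         key = " | ".join(parts)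
--         groups.setdefault(key, []).append(p)
--
--     # Sort keys for determinism
--     return dict(sorted(groups.items()))
-- ===== SOURCE B (Python) =====
-- def group_papers(
--     papers: list[dict],
--     group_by: list[str] | None = None,
-- ) -> dict[str, list[dict]]:
--     """Group papers by one or more fields (sorted-distinct-keys + filter)."""
--     if not group_by:
--         return {"all": papers}
--
--     def key_of(p):
--         return " | ".join(
--             ",".join(str(x) for x in v) if isinstance(v, list) else str(v)
--             for v in (p.get(f, "unknown") for f in group_by)
--         )
--
--     keys = sorted({key_of(p) for p in papers})
--     return {k: [p for p in papers if key_of(p) == k] for k in keys}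
-- ===== Notes on version B (the rewrite author's own statement) =====
-- stated objective: alternative
-- what changed: Replaces the one-pass dict accumulation (setdefault/append then sort of the items) by computing the sorted set of distinct group keys and building each group with a filter pass over the papers.
import Mathlib
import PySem

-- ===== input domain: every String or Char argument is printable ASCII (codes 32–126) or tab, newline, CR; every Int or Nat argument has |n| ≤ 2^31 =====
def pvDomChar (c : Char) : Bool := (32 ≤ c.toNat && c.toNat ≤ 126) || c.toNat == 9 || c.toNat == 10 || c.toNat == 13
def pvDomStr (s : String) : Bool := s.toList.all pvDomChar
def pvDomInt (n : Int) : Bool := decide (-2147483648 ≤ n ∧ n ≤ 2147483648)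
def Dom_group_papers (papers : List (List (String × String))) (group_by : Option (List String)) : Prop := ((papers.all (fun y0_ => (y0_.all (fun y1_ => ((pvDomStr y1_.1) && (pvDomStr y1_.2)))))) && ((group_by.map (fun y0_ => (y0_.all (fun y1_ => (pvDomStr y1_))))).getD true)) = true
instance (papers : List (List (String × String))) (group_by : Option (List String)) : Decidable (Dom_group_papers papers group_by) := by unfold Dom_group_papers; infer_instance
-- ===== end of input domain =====

-- B replaces A's one-pass dict accumulation by sorted-distinct-keys + a filter per key: an alternative decomposition, same results.


-- ===== PORT A =====
-- Under the type convention the paper values are strings, so the 'isinstance(val, list)' branch never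
-- fires and str(val) is val itself. 'sorted(groups.items())' compares the pairs; the dict's keys are
-- unique, so the tuple comparison is exactly comparison by the key (first component).
def group_papers (papers : List (List (String × String))) (group_by : Option (List String)) : List (String × List (List (String × String))) :=
  match group_by with
  | none => [("all", papers)]
  | some gb =>
    if gb.isEmpty then [("all", papers)]
    else
      let groups : PySem.Dict String (List (List (String × String))) :=
        papers.foldl (fun groups p =>
          let parts := gb.foldl (fun parts field =>
            parts ++ [PySem.Dict.getD (PySem.Dict.mk p) field "unknown"]) []
          let key := PySem.Str.join " | " parts
          groups.modify key [] (fun g => g ++ [p])) PySem.Dict.empty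
      PySem.List.sorted groups.items (fun q => q.1) false

-- ===== PORT B =====
def pvKeyOf (gb : List String) (p : List (String × String)) : String :=
  PySem.Str.join " | " (gb.map (fun f => PySem.Dict.getD (PySem.Dict.mk p) f "unknown"))

def group_papers_alt (papers : List (List (String × String))) (group_by : Option (List String)) : List (String × List (List (String × String))) :=
  match group_by with
  | none => [("all", papers)]
  | some gb =>
    if gb.isEmpty then [("all", papers)]
    else
      let keys := PySem.List.sorted (PySem.Set.ofList (papers.map (pvKeyOf gb))) (fun k => k) false
      keys.map (fun k => (k, papers.filter (fun p => pvKeyOf gb p == k)))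

-- ===== PRECONDITION & SPEC =====
def Spec_group_papers (papers : List (List (String × String))) (group_by : Option (List String)) (out : List (String × List (List (String × String)))) : Prop := out = group_papers_alt papers group_by
instance (papers : List (List (String × String))) (group_by : Option (List String)) (out : List (String × List (List (String × String)))) : Decidable (Spec_group_papers papers group_by out) := by unfold Spec_group_papers; infer_instance

-- ===== CLAIM (what is proved, stated in full; the proofs are below) =====
def Claim_equal_group_papers : Prop := ∀ (papers : List (List (String × String))) (group_by : Option (List String)), Dom_group_papers papers group_by → Spec_group_papers papers group_by (group_papers papers group_by)

-- ===== LEMMAS AND PROOFS =====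

-- A's inner parts loop computes the same key as B's map-based key function.
theorem pvKeyA_eq (gb : List String) (p : List (String × String)) :
    PySem.Str.join " | " (gb.foldl (fun parts field =>
      parts ++ [PySem.Dict.getD (PySem.Dict.mk p) field "unknown"]) []) = pvKeyOf gb p := by
  unfold pvKeyOf
  congr 1
  simpa using PySem.List.foldl_append_singleton_eq_map
    (fun field => PySem.Dict.getD (PySem.Dict.mk p) field "unknown") gb []

-- The grouping dict's value at any key k is the filter of the papers whose key is k.
theorem pvGetD_groups (gb : List String) (papers : List (List (String × String))) (k : String) :
    (papers.foldl (fun d p => d.modify (pvKeyOf gb p) [] (fun g => g ++ [p]))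
      (PySem.Dict.empty : PySem.Dict String (List (List (String × String))))).getD k []
      = papers.filter (fun p => pvKeyOf gb p == k) := by
  have h := PySem.Dict.getD_foldl_modify_append
    (papers.map (fun p => (pvKeyOf gb p, p)))
    (PySem.Dict.empty : PySem.Dict String (List (List (String × String)))) k
  rw [List.foldl_map] at h
  rw [h]
  simp [List.filter_map, Function.comp_def]

theorem group_papers_spec : Claim_equal_group_papers := by
  unfold Claim_equal_group_papers
  intro papers group_by _
  unfold Spec_group_papers group_papers group_papers_alt
  cases group_by with
  | none => rfl
  | some gb =>
    by_cases hgb : gb.isEmpty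
    · simp [hgb]
    · dsimp only
      rw [if_neg hgb, if_neg hgb]
      -- rewrite A's inner key computation to pvKeyOf
      have hstep : (fun (d : PySem.Dict String (List (List (String × String)))) p =>
          d.modify (PySem.Str.join " | " (gb.foldl (fun parts field =>
            parts ++ [PySem.Dict.getD (PySem.Dict.mk p) field "unknown"]) [])) [] (fun g => g ++ [p]))
          = fun d p => d.modify (pvKeyOf gb p) [] (fun g => g ++ [p]) := by
        funext d p; rw [pvKeyA_eq]
      rw [hstep]
      set D := papers.foldl (fun d p => d.modify (pvKeyOf gb p) [] (fun g => g ++ [p]))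
        (PySem.Dict.empty : PySem.Dict String (List (List (String × String)))) with hD
      have hkeys : D.keys = PySem.Set.ofList (papers.map (pvKeyOf gb)) := by
        rw [hD]
        exact PySem.Dict.keys_foldl_modify_key papers (pvKeyOf gb) [] _ PySem.Dict.empty
      have hnodup : D.keys.Nodup := by
        rw [hD]
        exact PySem.Dict.nodup_keys_foldl_modify_key papers (pvKeyOf gb) [] _ PySem.Dict.empty
          PySem.Dict.nodup_keys_empty
      have hitems : D.items = D.keys.map (fun k => (k, D.getD k [])) :=
        PySem.Dict.items_eq_map_keys D hnodup []
      -- the sorted items are the sorted keys paired with their groups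
      have hsorted : PySem.List.sorted D.items (fun q => q.1) false
          = (PySem.List.sorted D.keys (fun k => k) false).map (fun k => (k, D.getD k [])) := by
        refine PySem.List.sorted_eq_of_perm_of_pairwise_lt D.items _ (fun q => q.1) ?_ ?_
        · rw [hitems]
          exact (PySem.List.sorted_perm D.keys (fun k => k) false).map _
        · have hp : (PySem.List.sorted D.keys (fun k => k) false).Pairwise (· < ·) := by
            rw [hkeys]; exact PySem.List.sorted_ofList_pairwise_lt (papers.map (pvKeyOf gb))
          exact List.Pairwise.map _ (fun a b hab => hab) hp
      rw [hsorted, hkeys]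
      exact List.map_congr_left (fun k _ => by rw [hD, pvGetD_groups])
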